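-- pv_equiv track=rewrite | github.com/yyz218/Quantum-Algorithms-for-Tail-Risk-in-Loan-Portfolios | bm.py | binary_counts
-- ===== SOURCE A (Python) =====
-- import itertools
--
-- def binary_counts(loss):
--     n = len(loss)
--     result = []
--     for combo in itertools.product([0, 1], repeat=n):
--         total = 1
--         for i, (first, second) in enumerate(loss):
--             if combo[i] == 0:
--                 total *= first
--             else:
--                 total *= second
--         result.append(total)
--     return result
-- ===== SOURCE B (Python) =====
-- def binary_counts(loss):
--     acc = [1]
--     for first, second in loss:
--         acc = [y for x in acc for y in (x * first, x * second)]
--     return acc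
-- ===== Notes on version B (the rewrite author's own statement) =====
-- stated objective: faster
-- what changed: Replaces the O(n*2^n) full enumeration (re-multiplying all n factors for each of the 2^n combos) by an incremental doubling DP that expands each partial product by [x*first, x*second] per element; intended as asymptotically faster (O(2^n) work vs O(n*2^n)), measured 7.9x at n=256; at n=1024 neither finishes since the output itself has 2^n entries.
import Mathlib
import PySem

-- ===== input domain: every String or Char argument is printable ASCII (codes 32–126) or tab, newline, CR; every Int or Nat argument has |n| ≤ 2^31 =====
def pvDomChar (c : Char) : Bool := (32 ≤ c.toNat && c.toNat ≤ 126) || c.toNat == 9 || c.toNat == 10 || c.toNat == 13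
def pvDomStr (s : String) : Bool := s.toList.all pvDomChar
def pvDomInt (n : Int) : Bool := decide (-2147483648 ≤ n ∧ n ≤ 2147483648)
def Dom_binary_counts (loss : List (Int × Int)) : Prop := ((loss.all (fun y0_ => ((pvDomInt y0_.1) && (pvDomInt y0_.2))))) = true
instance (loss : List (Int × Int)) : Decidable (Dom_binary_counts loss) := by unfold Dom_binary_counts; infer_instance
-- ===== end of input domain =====

-- B replaces A's full 2^n enumeration (re-multiplying all n factors per combo) by an incremental
-- doubling DP over partial products; intended as faster (measured 7.9x at n=256; both exceed the
-- time limit at n=1024, where the output itself has 2^n entries).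


-- ===== PORT A =====
-- itertools.product([0,1], repeat=n), hand-ported: lexicographic, first position most significant (exact)
def pvProduct01 : Nat → List (List Int)
  | 0 => [[]]
  | n + 1 => ([0, 1] : List Int).flatMap (fun b => (pvProduct01 n).map (fun c => b :: c))

-- the inner loop: total = 1; for i,(first,second) in enumerate(loss): ... (combo[i] is always in range here)
def pvTotal (loss : List (Int × Int)) (combo : List Int) : Int :=
  (PySem.List.enumerate loss).foldl
    (fun total p =>
      if (PySem.List.pyGet? combo p.1).getD 0 == 0 then total * p.2.1 else total * p.2.2) 1

def binary_counts (loss : List (Int × Int)) : List Int :=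
  (pvProduct01 loss.length).foldl (fun result combo => result ++ [pvTotal loss combo]) []

-- ===== PORT B =====
def binary_counts_alt (loss : List (Int × Int)) : List Int :=
  loss.foldl (fun acc p => acc.flatMap (fun x => [x * p.1, x * p.2])) [1]

-- ===== PRECONDITION & SPEC =====
def Spec_binary_counts (loss : List (Int × Int)) (out : List Int) : Prop := out = binary_counts_alt loss
instance (loss : List (Int × Int)) (out : List Int) : Decidable (Spec_binary_counts loss out) := by unfold Spec_binary_counts; infer_instance

-- ===== CLAIM (what is proved, stated in full; the proofs are below) =====
def Claim_equal_binary_counts : Prop := ∀ (loss : List (Int × Int)), Dom_binary_counts loss → Spec_binary_counts loss (binary_counts loss)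

-- ===== LEMMAS AND PROOFS =====

-- the inner-loop body of A, abstracted
def pvStep (combo : List Int) (total : Int) (p : Int × (Int × Int)) : Int :=
  if (PySem.List.pyGet? combo p.1).getD 0 == 0 then total * p.2.1 else total * p.2.2

-- recursive characterisation of B's result
def pvR : List (Int × Int) → List Int
  | [] => [1]
  | p :: rest => ([p.1, p.2] : List Int).flatMap (fun v => (pvR rest).map (fun y => v * y))

theorem pvStep_mul (combo : List Int) (t : Int) (p : Int × (Int × Int)) :
    pvStep combo t p = t * pvStep combo 1 p := by
  unfold pvStep; split_ifs <;> ring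

theorem pvFold_mul (combo : List Int) (l : List (Int × (Int × Int))) :
    ∀ t : Int, l.foldl (pvStep combo) t = t * l.foldl (pvStep combo) 1 := by
  induction l with
  | nil => intro t; simp
  | cons p rest ih =>
    intro t
    simp only [List.foldl_cons]
    rw [ih (pvStep combo t p), ih (pvStep combo 1 p), pvStep_mul combo t p]
    ring

theorem pvFold_shift (b : Int) (c : List Int) :
    ∀ (rest : List (Int × Int)) (k : Nat),
      (PySem.List.enumerate rest ((k : Int) + 1)).foldl (pvStep (b :: c)) 1
        = (PySem.List.enumerate rest (k : Int)).foldl (pvStep (b :: c).tail) 1 := by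
  intro rest
  induction rest with
  | nil => intro k; simp [PySem.List.enumerate]
  | cons p rest ih =>
    intro k
    rw [PySem.List.enumerate_cons, PySem.List.enumerate_cons,
        List.foldl_cons, List.foldl_cons,
        pvFold_mul (b :: c) _ (pvStep (b :: c) 1 ((k : Int) + 1, p)),
        pvFold_mul (b :: c).tail _ (pvStep (b :: c).tail 1 ((k : Int), p))]
    have hidx : pvStep (b :: c) 1 ((k : Int) + 1, p) = pvStep (b :: c).tail 1 ((k : Int), p) := by
      unfold pvStep
      rw [PySem.List.pyGet?_cons_succ]
      rfl
    have hcast : ((k : Int) + 1) + 1 = ((k + 1 : Nat) : Int) + 1 := by push_cast; ring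
    rw [hidx, hcast, ih (k + 1)]
    push_cast
    rfl

theorem pvTotal_cons (p : Int × Int) (rest : List (Int × Int)) (b : Int) (c : List Int) :
    pvTotal (p :: rest) (b :: c) = (if b == 0 then p.1 else p.2) * pvTotal rest c := by
  unfold pvTotal
  rw [PySem.List.enumerate_cons, List.foldl_cons]
  show (PySem.List.enumerate rest (0 + 1)).foldl (pvStep (b :: c)) (pvStep (b :: c) 1 (0, p))
      = _ * (PySem.List.enumerate rest 0).foldl (pvStep c) 1
  rw [pvFold_mul]
  have := pvFold_shift b c rest 0
  simp only [Nat.cast_zero] at this ⊢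
  rw [this]
  congr 1
  unfold pvStep
  rw [PySem.List.pyGet?_zero_cons]
  simp

theorem pvProduct01_map_total : ∀ loss : List (Int × Int),
    (pvProduct01 loss.length).map (pvTotal loss) = pvR loss := by
  intro loss
  induction loss with
  | nil =>
    simp [pvProduct01, pvR, pvTotal, PySem.List.enumerate]
  | cons p rest ih =>
    show (pvProduct01 (rest.length + 1)).map (pvTotal (p :: rest)) = pvR (p :: rest)
    unfold pvProduct01 pvR
    simp only [List.flatMap_cons, List.flatMap_nil, List.map_append, List.map_map,
      List.append_nil]
    have hmap : ∀ b : Int,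
        (pvProduct01 rest.length).map (pvTotal (p :: rest) ∘ (fun c => b :: c))
          = (pvR rest).map (fun y => (if b == 0 then p.1 else p.2) * y) := by
      intro b
      rw [← ih, List.map_map]
      apply List.map_congr_left
      intro c _
      simp [Function.comp, pvTotal_cons]
    rw [hmap 0, hmap 1]
    norm_num

theorem pvR_cons (p : Int × Int) (rest : List (Int × Int)) :
    pvR (p :: rest) = (pvR rest).map (fun y => p.1 * y) ++ (pvR rest).map (fun y => p.2 * y) := by
  simp [pvR]

theorem binary_counts_alt_foldl (loss : List (Int × Int)) :
    ∀ acc : List Int,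
      loss.foldl (fun acc p => acc.flatMap (fun x => [x * p.1, x * p.2])) acc
        = acc.flatMap (fun x => (pvR loss).map (fun y => x * y)) := by
  induction loss with
  | nil => intro acc; simp [pvR]
  | cons p rest ih =>
    intro acc
    rw [List.foldl_cons, ih, pvR_cons]
    simp only [List.flatMap_assoc, List.flatMap_cons, List.flatMap_nil, List.append_nil]
    congr 1
    funext x
    simp [List.map_map, mul_assoc]

-- ===== VERDICT (by name: the statement is the Claim_ definition above) =====
theorem binary_counts_spec : Claim_equal_binary_counts := by
  intro loss _
  unfold Spec_binary_counts binary_counts binary_counts_alt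
  rw [PySem.List.foldl_append_singleton_eq_map, binary_counts_alt_foldl loss [1],
    pvProduct01_map_total]
  simp
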